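-- pv_equiv track=rewrite | github.com/luojiahai/x-image-downloader | xid/downloader.py | extract_filename_from_url
-- ===== SOURCE A (Python) =====
-- def extract_filename_from_url(url: str) -> str:
--     """Extract filename from URL, handling Twitter size suffixes.
--
--     Args:
--         url: Image URL
--
--     Returns:
--         Cleaned filename
--     """
--     # Remove query parameters
--     url_path = url.split('?')[0]
--     # Get last part of path
--     image_filename = url_path.split('/')[-1]
--
--     # Handle URLs with size suffixes
--     size_suffixes = [':large', ':medium', ':small', ':thumb']
--     for suffix in size_suffixes:
--         if image_filename.endswith(suffix):
--             # Split off the suffix and get the extension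
--             name_part = image_filename[:-len(suffix)]
--             # Re-add extension if it was removed
--             if '.' in name_part:
--                 image_filename = name_part
--             break
--
--     return image_filename
-- ===== SOURCE B (Python) =====
-- def extract_filename_from_url(url: str) -> str:
--     """Extract filename from URL, handling Twitter size suffixes."""
--     name = url.split('?')[0].split('/')[-1]
--     # single backward scan for the last ':' instead of trying each suffix
--     i = len(name) - 1
--     while i >= 0 and name[i] != ':':
--         i -= 1
--     if i >= 0:
--         head, tail = name[:i], name[i + 1:]
--         if tail in ('large', 'medium', 'small', 'thumb') and '.' in head:
--             return head
--     return name
-- ===== Notes on version B (the rewrite author's own statement) =====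
-- stated objective: alternative
-- what changed: A tries each of the four size suffixes with endswith and slices the matched one off; B makes a single backward scan for the last colon character, splits the name there once, and compares the tail against the four size words.
import Mathlib
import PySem

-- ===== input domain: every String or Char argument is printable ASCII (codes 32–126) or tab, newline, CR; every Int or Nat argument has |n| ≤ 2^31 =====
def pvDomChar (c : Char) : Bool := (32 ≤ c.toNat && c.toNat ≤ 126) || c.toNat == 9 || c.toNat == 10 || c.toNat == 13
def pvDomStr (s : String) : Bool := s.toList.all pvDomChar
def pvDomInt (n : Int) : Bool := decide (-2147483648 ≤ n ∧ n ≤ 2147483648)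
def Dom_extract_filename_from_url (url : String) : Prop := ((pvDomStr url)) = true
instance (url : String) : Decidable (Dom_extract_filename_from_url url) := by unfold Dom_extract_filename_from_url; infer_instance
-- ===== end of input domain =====

-- B replaces A's four endswith probes by one backward scan to the last colon, splitting the name there once (alternative decomposition, same cost).

-- ===== PORT A =====
-- A's for-loop over the size suffixes, with its break semantics: the first matching
-- suffix decides; the dot test chooses between the trimmed and the original name.
def pvLoopA : List (List Char) → List Char → List Char
  | [], name => name
  | suf :: rest, name =>
    if PySem.Chars.endswith name suf then
      -- name_part = image_filename[:-len(suffix)]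
      let np := PySem.List.slice name none (some (-(PySem.List.len suf)))
      if PySem.Chars.isIn ['.'] np then np else name
    else pvLoopA rest name

def extract_filename_from_url (url : String) : String :=
  let urlPath := PySem.List.pyGetD (PySem.Chars.splitOn url.toList ['?']) 0 []    -- url.split('?')[0] (split on a non-empty sep is never empty)
  let name := PySem.List.pyGetD (PySem.Chars.splitOn urlPath ['/']) (-1) []       -- url_path.split('/')[-1]
  String.ofList (pvLoopA [":large".toList, ":medium".toList, ":small".toList, ":thumb".toList] name)

-- ===== PORT B =====
-- Source B's backward while-loop: walk the reversed name until the first ':' found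
-- (= the last ':' of name); acc collects the chars already passed, i.e. the tail.
def pvLastColon : List Char → List Char → Option (List Char × List Char)
  | [], _ => none
  | c :: cs, acc => if c = ':' then some (cs.reverse, acc) else pvLastColon cs (c :: acc)

def extract_filename_from_url_alt (url : String) : String :=
  let urlPath := PySem.List.pyGetD (PySem.Chars.splitOn url.toList ['?']) 0 []
  let name := PySem.List.pyGetD (PySem.Chars.splitOn urlPath ['/']) (-1) []
  match pvLastColon name.reverse [] with
  | some (head, tail) =>
    if (tail = "large".toList ∨ tail = "medium".toList ∨ tail = "small".toList ∨ tail = "thumb".toList)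
        ∧ PySem.Chars.isIn ['.'] head = true then
      String.ofList head
    else String.ofList name
  | none => String.ofList name

-- ===== PRECONDITION & SPEC =====
def Spec_extract_filename_from_url (url : String) (out : String) : Prop := out = extract_filename_from_url_alt url
instance (url : String) (out : String) : Decidable (Spec_extract_filename_from_url url out) := by unfold Spec_extract_filename_from_url; infer_instance

-- ===== CLAIM (what is proved, stated in full; the proofs are below) =====
def Claim_equal_extract_filename_from_url : Prop := ∀ (url : String), Dom_extract_filename_from_url url → Spec_extract_filename_from_url url (extract_filename_from_url url)

-- ===== LEMMAS AND PROOFS =====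

-- B's scan finds nothing iff there is no colon
theorem pvLastColon_none (r acc : List Char) (h : ':' ∉ r) : pvLastColon r acc = none := by
  induction r generalizing acc with
  | nil => rfl
  | cons c cs ih =>
    simp only [pvLastColon]
    simp at h
    rw [if_neg (fun hc => h.1 hc.symm)]
    exact ih _ h.2

-- B's scan on t ++ ':' :: r' with colon-free t stops at that colon
theorem pvLastColon_some (t r' : List Char) (acc : List Char) (h : ':' ∉ t) :
    pvLastColon (t ++ ':' :: r') acc = some (r'.reverse, t.reverse ++ acc) := by
  induction t generalizing acc with
  | nil => simp [pvLastColon]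
  | cons c cs ih =>
    simp only [List.cons_append, pvLastColon]
    simp at h
    rw [if_neg (fun hc => h.1 hc.symm)]
    rw [ih _ h.2]
    simp

-- matching a colon-free block next to a ':' is unique
theorem colon_block_eq (a : List Char) : ∀ (b x y : List Char), ':' ∉ a → ':' ∉ b →
    a ++ ':' :: x = b ++ ':' :: y → a = b ∧ x = y := by
  induction a with
  | nil =>
    intro b x y _ hb he
    cases b with
    | nil => simpa using he
    | cons c bs => simp at he hb; exact absurd he.1 hb.1
  | cons c as ih =>
    intro b x y ha hb he
    cases b with
    | nil => simp at he ha; exact absurd he.1.symm ha.1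
    | cons d bs =>
      simp only [List.cons_append, List.cons.injEq] at he
      obtain ⟨h1, h2⟩ := he
      obtain ⟨h3, h4⟩ := ih bs x y (by simp at ha; exact ha.2) (by simp at hb; exact hb.2) h2
      exact ⟨by rw [h1, h3], h4⟩

-- name ends with the ':'-anchored word iff the tail after the LAST colon is that word
theorem endswith_colon_iff (hd tl w : List Char) (htl : ':' ∉ tl) (hw : ':' ∉ w) :
    PySem.Chars.endswith (hd ++ ':' :: tl) (':' :: w) = true ↔ tl = w := by
  rw [PySem.Chars.endswith_iff]
  constructor
  · rintro ⟨p, hp⟩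
    have h : p ++ ':' :: w = hd ++ ':' :: tl := hp
    -- compare the reversed forms to align on the LAST colon
    have hrev : w.reverse ++ ':' :: p.reverse = tl.reverse ++ ':' :: hd.reverse := by
      have := congrArg List.reverse h
      simpa using this
    have hwt := (colon_block_eq w.reverse tl.reverse p.reverse hd.reverse
      (by simpa using hw) (by simpa using htl) hrev).1
    have : w = tl := by simpa using congrArg List.reverse hwt
    exact this.symm
  · rintro rfl
    exact ⟨hd, rfl⟩

theorem endswith_colon_false_of_no_colon (name w : List Char) (h : ':' ∉ name) :
    PySem.Chars.endswith name (':' :: w) = false := by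
  rw [Bool.eq_false_iff]
  intro hc
  rw [PySem.Chars.endswith_iff] at hc
  exact h (hc.mem (by simp))

-- image_filename[:-len(':' :: w)] cuts exactly that suffix
theorem slice_cut (hd w : List Char) :
    PySem.List.slice (hd ++ ':' :: w) none (some (-(PySem.List.len (':' :: w)))) = hd := by
  simp only [PySem.List.slice, PySem.List.len, PySem.List.clampIdx]
  simp
  rw [if_pos (by omega), if_neg (by omega)]
  have h : (↑hd.length + (↑w.length + 1) + (-1 + -↑w.length) : Int).toNat = hd.length := by omega
  rw [h, List.take_left]

-- A's suffix loop on a name with a last colon, phrased through that decomposition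
theorem loopA_branch (hd tl : List Char) (ht : ':' ∉ tl) :
    pvLoopA [":large".toList, ":medium".toList, ":small".toList, ":thumb".toList] (hd ++ ':' :: tl)
      = if (tl = "large".toList ∨ tl = "medium".toList ∨ tl = "small".toList ∨ tl = "thumb".toList)
            ∧ PySem.Chars.isIn ['.'] hd = true then hd else (hd ++ ':' :: tl) := by
  have l1 : (":large".toList : List Char) = ':' :: "large".toList := by decide
  have l2 : (":medium".toList : List Char) = ':' :: "medium".toList := by decide
  have l3 : (":small".toList : List Char) = ':' :: "small".toList := by decide
  have l4 : (":thumb".toList : List Char) = ':' :: "thumb".toList := by decide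
  have ff : ∀ w : List Char, ':' ∉ w → tl ≠ w →
      PySem.Chars.endswith (hd ++ ':' :: tl) (':' :: w) = false := fun w hw hne => by
    rw [Bool.eq_false_iff]
    exact fun hc => hne ((endswith_colon_iff hd tl w ht hw).mp hc)
  have dotcase : ∀ (c : Prop) [Decidable c], c →
      (if PySem.Chars.isIn ['.'] hd = true then hd else hd ++ ':' :: tl)
        = if c ∧ PySem.Chars.isIn ['.'] hd = true then hd else hd ++ ':' :: tl := by
    intro c _ hc
    by_cases hdot : PySem.Chars.isIn ['.'] hd = true
    · rw [if_pos hdot, if_pos ⟨hc, hdot⟩]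
    · rw [if_neg hdot, if_neg (fun hco => hdot hco.2)]
  simp only [pvLoopA, l1, l2, l3, l4]
  by_cases h1 : tl = "large".toList
  · rw [if_pos ((endswith_colon_iff hd tl "large".toList ht (by decide)).mpr h1)]
    rw [h1, slice_cut hd "large".toList, ← h1]
    exact dotcase _ (Or.inl rfl)
  · rw [ff "large".toList (by decide) h1]
    simp only [Bool.false_eq_true, if_false]
    by_cases h2 : tl = "medium".toList
    · rw [if_pos ((endswith_colon_iff hd tl "medium".toList ht (by decide)).mpr h2)]
      rw [h2, slice_cut hd "medium".toList, ← h2]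
      exact dotcase _ (Or.inr (Or.inl rfl))
    · rw [ff "medium".toList (by decide) h2]
      simp only [Bool.false_eq_true, if_false]
      by_cases h3 : tl = "small".toList
      · rw [if_pos ((endswith_colon_iff hd tl "small".toList ht (by decide)).mpr h3)]
        rw [h3, slice_cut hd "small".toList, ← h3]
        exact dotcase _ (Or.inr (Or.inr (Or.inl rfl)))
      · rw [ff "small".toList (by decide) h3]
        simp only [Bool.false_eq_true, if_false]
        by_cases h4 : tl = "thumb".toList
        · rw [if_pos ((endswith_colon_iff hd tl "thumb".toList ht (by decide)).mpr h4)]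
          rw [h4, slice_cut hd "thumb".toList, ← h4]
          exact dotcase _ (Or.inr (Or.inr (Or.inr rfl)))
        · rw [ff "thumb".toList (by decide) h4]
          simp only [Bool.false_eq_true, if_false]
          rw [if_neg]
          rintro ⟨(h | h | h | h), -⟩
          exacts [h1 h, h2 h, h3 h, h4 h]

-- the two cores agree on an arbitrary extracted name
theorem core_eq (name : List Char) :
    pvLoopA [":large".toList, ":medium".toList, ":small".toList, ":thumb".toList] name =
      (match pvLastColon name.reverse [] with
       | some (head, tail) =>
         if (tail = "large".toList ∨ tail = "medium".toList ∨ tail = "small".toList ∨ tail = "thumb".toList)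
             ∧ PySem.Chars.isIn ['.'] head = true then head else name
       | none => name) := by
  cases hd : name.reverse.dropWhile (fun c => c ≠ ':') with
  | nil =>
    have hnc : ':' ∉ name := by
      intro hm
      have hmr : ':' ∈ name.reverse := by simpa using hm
      rw [← List.takeWhile_append_dropWhile (p := fun c => c ≠ ':') (l := name.reverse), hd] at hmr
      simp only [List.append_nil] at hmr
      have := List.mem_takeWhile_imp hmr
      simp at this
    rw [pvLastColon_none _ [] (fun h => hnc (by simpa using h))]
    have l1 : (":large".toList : List Char) = ':' :: "large".toList := by decide
    have l2 : (":medium".toList : List Char) = ':' :: "medium".toList := by decide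
    have l3 : (":small".toList : List Char) = ':' :: "small".toList := by decide
    have l4 : (":thumb".toList : List Char) = ':' :: "thumb".toList := by decide
    simp only [pvLoopA, l1, l2, l3, l4,
      endswith_colon_false_of_no_colon name "large".toList hnc,
      endswith_colon_false_of_no_colon name "medium".toList hnc,
      endswith_colon_false_of_no_colon name "small".toList hnc,
      endswith_colon_false_of_no_colon name "thumb".toList hnc,
      Bool.false_eq_true, if_false]
  | cons c r' =>
    have hc : c = ':' := by
      have hne : name.reverse.dropWhile (fun c => decide (c ≠ ':')) ≠ [] := by rw [hd]; simp
      have h2 := List.head_dropWhile_not (fun c : Char => decide (c ≠ ':')) hne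
      simp only [hd] at h2
      simpa using h2
    have hsplit : name.reverse = name.reverse.takeWhile (fun c => c ≠ ':') ++ ':' :: r' := by
      conv_lhs => rw [← List.takeWhile_append_dropWhile (p := fun c => c ≠ ':') (l := name.reverse)]
      rw [hd, hc]
    have ht : ':' ∉ name.reverse.takeWhile (fun c => c ≠ ':') := fun hm => by
      have := List.mem_takeWhile_imp hm; simp at this
    have hname : name = r'.reverse ++ ':' :: (name.reverse.takeWhile (fun c => c ≠ ':')).reverse := by
      have := congrArg List.reverse hsplit; simpa using this
    rw [hsplit, pvLastColon_some _ r' [] ht]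
    simp only [List.append_nil]
    conv_lhs => rw [hname, loopA_branch r'.reverse _ (by simpa using ht)]
    rw [← hname]

-- ===== VERDICT (by name: the statement is the Claim_ definition above) =====
theorem extract_filename_from_url_spec : Claim_equal_extract_filename_from_url := by
  intro url _
  unfold Spec_extract_filename_from_url extract_filename_from_url extract_filename_from_url_alt
  simp only []
  rw [core_eq]
  rcases h : pvLastColon ((PySem.List.pyGetD (PySem.Chars.splitOn (PySem.List.pyGetD (PySem.Chars.splitOn url.toList ['?']) 0 []) ['/']) (-1) []).reverse) [] with _ | ⟨head, tail⟩
  · rfl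
  · simp only []
    split <;> rfl
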